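-- pv_equiv track=rewrite | github.com/Tahmwellrups/six_men_morris | six_men_morris.py | count_threats
-- ===== SOURCE A (Python) =====
-- ROW_COUNT = 5
--
-- COLUMN_COUNT = 5
--
-- def count_threats(board, piece):
--     threats = 0
--     # Iterate over all positions on the board
--     for r in range(ROW_COUNT):
--         for c in range(COLUMN_COUNT):
--             # Check if the position is empty
--             if board[r][c] == 0:
--                 # Check if placing a piece at this position forms a threat
--                 if forms_threat(board, r, c, piece):
--                     threats += 100
--     return threats
--
-- def forms_threat(board, row, col, piece):
--     # Check all rows except the middle one for a mill
--     if row != 2 and [board[row][c] for c in range(COLUMN_COUNT)].count(piece) == 2: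
--         return True
--
--     # Check all columns except the middle one for a mill
--     if col != 2 and [board[r][col] for r in range(ROW_COUNT)].count(piece) == 2:
--         return True
--
--     return False
-- ===== SOURCE B (Python) =====
-- ROW_COUNT = 5
--
-- COLUMN_COUNT = 5
--
-- def count_threats(board, piece):
--     # Precompute per-row and per-column piece counts once, then test cells directly.
--     row_counts = [[board[r][c] for c in range(COLUMN_COUNT)].count(piece) for r in range(ROW_COUNT)]
--     col_counts = [[board[r][c] for r in range(ROW_COUNT)].count(piece) for c in range(COLUMN_COUNT)]
--     total = 0
--     for r in range(ROW_COUNT):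
--         for c in range(COLUMN_COUNT):
--             if board[r][c] == 0 and ((r != 2 and row_counts[r] == 2) or (c != 2 and col_counts[c] == 2)):
--                 total += 100
--     return total
-- ===== Notes on version B (the rewrite author's own statement) =====
-- stated objective: simpler
-- what changed: B precomputes per-row and per-column piece counts once (a table scan) and inlines the threat test per empty cell, dropping the forms_threat helper that rescans the whole row and column for every empty cell.
import Mathlib
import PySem

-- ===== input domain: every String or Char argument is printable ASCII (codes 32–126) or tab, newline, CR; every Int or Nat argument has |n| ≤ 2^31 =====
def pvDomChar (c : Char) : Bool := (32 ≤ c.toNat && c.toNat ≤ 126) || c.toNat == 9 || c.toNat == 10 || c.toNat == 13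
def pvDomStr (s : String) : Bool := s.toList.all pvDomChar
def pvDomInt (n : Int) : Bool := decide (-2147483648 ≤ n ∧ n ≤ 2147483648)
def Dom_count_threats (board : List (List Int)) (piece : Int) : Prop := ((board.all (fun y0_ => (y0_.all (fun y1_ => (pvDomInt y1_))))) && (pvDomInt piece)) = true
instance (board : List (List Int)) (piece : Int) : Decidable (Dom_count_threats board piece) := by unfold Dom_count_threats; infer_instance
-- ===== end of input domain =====

-- B builds the row/column piece-count tables once and inlines the threat test; A rescans the row and column for each empty cell via forms_threat. Same value everywhere both return.

-- ===== PORT A =====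
def forms_threat (board : List (List Int)) (row col : Int) (piece : Int) : Bool :=
  if row ≠ 2 ∧ PySem.List.count ((PySem.List.pyRange 0 5 1).map
      (fun c => PySem.List.pyGetD (PySem.List.pyGetD board row []) c 0)) piece = 2 then
    true
  else if col ≠ 2 ∧ PySem.List.count ((PySem.List.pyRange 0 5 1).map
      (fun r => PySem.List.pyGetD (PySem.List.pyGetD board r []) col 0)) piece = 2 then
    true
  else
    false

def count_threats (board : List (List Int)) (piece : Int) : Int :=
  (PySem.List.pyRange 0 5 1).foldl (fun threats r =>
    (PySem.List.pyRange 0 5 1).foldl (fun threats c =>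
      if PySem.List.pyGetD (PySem.List.pyGetD board r []) c 0 = 0 then
        if forms_threat board r c piece then threats + 100 else threats
      else threats) threats) 0

-- ===== PORT B =====
def count_threats_alt (board : List (List Int)) (piece : Int) : Int :=
  let row_counts := (PySem.List.pyRange 0 5 1).map (fun r =>
    PySem.List.count ((PySem.List.pyRange 0 5 1).map
      (fun c => PySem.List.pyGetD (PySem.List.pyGetD board r []) c 0)) piece)
  let col_counts := (PySem.List.pyRange 0 5 1).map (fun c =>
    PySem.List.count ((PySem.List.pyRange 0 5 1).map
      (fun r => PySem.List.pyGetD (PySem.List.pyGetD board r []) c 0)) piece)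
  (PySem.List.pyRange 0 5 1).foldl (fun total r =>
    (PySem.List.pyRange 0 5 1).foldl (fun total c =>
      if PySem.List.pyGetD (PySem.List.pyGetD board r []) c 0 = 0 ∧
          ((r ≠ 2 ∧ PySem.List.pyGetD row_counts r 0 = 2) ∨
           (c ≠ 2 ∧ PySem.List.pyGetD col_counts c 0 = 2)) then
        total + 100
      else total) total) 0

-- ===== PRECONDITION & SPEC =====
-- Pre_ excludes boards with fewer than 5 rows or a row (among the first 5) with fewer
-- than 5 entries: there Python A (and B) raises IndexError.
def Pre_count_threats (board : List (List Int)) (_piece : Int) : Prop :=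
  5 ≤ board.length ∧ ∀ row ∈ board.take 5, 5 ≤ row.length
instance (board : List (List Int)) (piece : Int) : Decidable (Pre_count_threats board piece) := by
  unfold Pre_count_threats; infer_instance

def pvWitness_count_threats : List (List Int) × Int :=
  ([[0,0,0,0,0],[0,1,0,1,0],[0,0,0,0,0],[2,0,0,0,2],[0,0,0,0,0]], 1)

def Spec_count_threats (board : List (List Int)) (piece : Int) (out : Int) : Prop := out = count_threats_alt board piece
instance (board : List (List Int)) (piece : Int) (out : Int) : Decidable (Spec_count_threats board piece out) := by unfold Spec_count_threats; infer_instance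

-- ===== CLAIM (what is proved, stated in full; the proofs are below) =====
def Claim_equal_count_threats : Prop := ∀ (board : List (List Int)) (piece : Int), Dom_count_threats board piece → Pre_count_threats board piece → Spec_count_threats board piece (count_threats board piece)

-- ===== LEMMAS AND PROOFS =====

theorem forms_eq (board : List (List Int)) (r c piece : Int) :
    (forms_threat board r c piece = true) ↔
    ((r ≠ 2 ∧ PySem.List.count ((PySem.List.pyRange 0 5 1).map
        (fun c => PySem.List.pyGetD (PySem.List.pyGetD board r []) c 0)) piece = 2) ∨
     (c ≠ 2 ∧ PySem.List.count ((PySem.List.pyRange 0 5 1).map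
        (fun r => PySem.List.pyGetD (PySem.List.pyGetD board r []) c 0)) piece = 2)) := by
  unfold forms_threat
  split_ifs with h1 h2 <;> simp <;> tauto

theorem lookup_five (g : Int → Nat) (r : Int) (hr : r ∈ [(0:Int),1,2,3,4]) :
    PySem.List.pyGetD ([(0:Int),1,2,3,4].map g) r 0 = g r := by
  fin_cases hr <;> simp [PySem.List.pyGetD]

theorem cell_ite (b q : Prop) [Decidable b] [Decidable q] (t : Int) :
    (if b then (if q then t + 100 else t) else t) = if b ∧ q then t + 100 else t := by
  split_ifs <;> tauto

-- ===== VERDICT (by name: the statement is the Claim_ definition above) =====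
theorem count_threats_spec : Claim_equal_count_threats := by
  intro board piece _ _
  unfold Spec_count_threats count_threats count_threats_alt
  have hR : PySem.List.pyRange 0 5 1 = [(0:Int),1,2,3,4] := by decide
  simp only [hR]
  apply List.foldl_ext
  intro t r hr
  apply List.foldl_ext
  intro t c hc
  rw [lookup_five _ r hr, lookup_five _ c hc]
  simp only [forms_eq, hR]
  exact cell_ite _ _ t
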